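-- pv_equiv track=rewrite | github.com/jtauber/pyv6 | pyv6/bin/grep.py | matchstar
-- ===== SOURCE A (Python) =====
-- def matchhere(re, text):
--     if re == "":
--         return True
--     if len(re) > 1 and re[1] == "*":
--         return matchstar(re[0], re[2:], text)
--     if re == "$":
--         return (text == "")
--     if text != "" and (re[0] == "." or re[0] == text[0]):
--         return matchhere(re[1:], text[1:])
--     return False
--
-- def matchstar(c, re, text):
--     while True: # a * matches zero or more instances
--         if matchhere(re, text):
--             return True
--         if text == "":
--             break
--         text = text[1:]
--         if text != c and c != ".":
--             break
--     return False
-- ===== SOURCE B (Python) =====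
-- def matchhere(re, text):
--     if not re:
--         return True
--     head, rest = re[0], re[1:]
--     if rest[:1] == "*":
--         return matchstar(head, rest[1:], text)
--     if head == "$" and not rest:
--         return text == ""
--     return bool(text) and (head == "." or head == text[0]) and matchhere(rest, text[1:])
--
-- def matchstar(c, re, text):
--     if matchhere(re, text):
--         return True
--     if not text:
--         return False
--     rest = text[1:]
--     if c != "." and rest != c:
--         return False
--     return matchstar(c, re, rest)
-- ===== Notes on version B (the rewrite author's own statement) =====
-- stated objective: alternative
-- what changed: matchstar's while-True loop is replaced by direct recursion over suffixes of text, and matchhere is re-decomposed by head/rest destructuring: the star test becomes a one-character slice comparison on rest, the '$' test a head/rest pair of guards, and the literal-character step a single boolean conjunction instead of an if-with-recursive-call.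
import Mathlib
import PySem

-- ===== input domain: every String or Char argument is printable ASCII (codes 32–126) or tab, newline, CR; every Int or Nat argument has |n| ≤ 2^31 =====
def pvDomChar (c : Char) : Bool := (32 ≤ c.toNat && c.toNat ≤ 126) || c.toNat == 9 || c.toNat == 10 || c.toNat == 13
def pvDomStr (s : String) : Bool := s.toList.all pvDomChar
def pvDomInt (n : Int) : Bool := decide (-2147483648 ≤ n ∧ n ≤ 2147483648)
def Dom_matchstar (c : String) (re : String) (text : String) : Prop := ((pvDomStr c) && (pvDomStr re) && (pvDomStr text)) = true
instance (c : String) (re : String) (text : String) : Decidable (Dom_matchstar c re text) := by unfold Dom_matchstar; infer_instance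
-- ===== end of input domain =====

-- B recurses over suffixes of text where A's matchstar iterates a while-loop, and B's
-- matchhere is re-decomposed by head/rest destructuring; objective: alternative decomposition.

-- ===== PORT A =====
-- Both ports work on List Char, with String↔List Char wrappers at the top level.
mutual
  -- literal port of Source A matchhere: the if-chain over index tests, as written
  def matchhereA (re text : List Char) : Bool :=
    if re = [] then true
    else if 1 < re.length ∧ re.getD 1 ' ' = '*' then
      matchstarA [re.getD 0 ' '] (re.drop 2) text
    else if re = ['$'] then decide (text = [])
    else if text ≠ [] ∧ (re.getD 0 ' ' = '.' ∨ re.getD 0 ' ' = text.getD 0 ' ') then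
      matchhereA (re.drop 1) (text.drop 1)
    else false
  termination_by 2 * re.length + 2 * text.length
  decreasing_by
  · have := ‹1 < re.length ∧ re.getD 1 ' ' = '*'›.1
    simp only [List.length_drop]; omega
  · have := List.length_pos_of_ne_nil ‹text ≠ [] ∧ (re.getD 0 ' ' = '.' ∨ re.getD 0 ' ' = text.getD 0 ' ')›.1
    simp only [List.length_drop]; omega
  -- literal port of Source A matchstar: the `while True` loop as recursion over the state `text`
  def matchstarA (c re text : List Char) : Bool :=
    if matchhereA re text then true
    else if text = [] then false
    else if text.drop 1 ≠ c ∧ c ≠ ['.'] then false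
    else matchstarA c re (text.drop 1)
  termination_by 2 * re.length + 2 * text.length + 1
  decreasing_by
  · omega
  · have := List.length_pos_of_ne_nil ‹¬text = []›
    simp only [List.length_drop]; omega
end

def matchstar (c : String) (re : String) (text : String) : Bool :=
  matchstarA c.toList re.toList text.toList

-- ===== PORT B =====
mutual
  -- port of Source B matchhere: head/rest destructuring, final step one boolean conjunction
  def matchhereB : List Char → List Char → Bool
    | [], _ => true
    | head :: rest, text =>
      if rest.take 1 = ['*'] then matchstarB [head] (rest.drop 1) text
      else if head = '$' ∧ rest = [] then decide (text = [])
      else decide (text ≠ []) && (head == '.' || head == text.headD ' ') &&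
           matchhereB rest (text.drop 1)
  termination_by re text => 2 * re.length + 2 * text.length
  decreasing_by
  · simp only [List.length_drop, List.length_cons]; omega
  · simp only [List.length_drop, List.length_cons]; omega
  -- port of Source B matchstar: recursion over the suffixes of text
  def matchstarB (c re text : List Char) : Bool :=
    if matchhereB re text then true
    else
      match text with
      | [] => false
      | _ :: rest =>
        if c ≠ ['.'] ∧ rest ≠ c then false
        else matchstarB c re rest
  termination_by 2 * re.length + 2 * text.length + 1
  decreasing_by
  · omega
  · simp only [List.length_cons]; omega
end

def matchstar_alt (c : String) (re : String) (text : String) : Bool :=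
  matchstarB c.toList re.toList text.toList

-- ===== PRECONDITION & SPEC =====
def Spec_matchstar (c : String) (re : String) (text : String) (out : Bool) : Prop := out = matchstar_alt c re text
instance (c : String) (re : String) (text : String) (out : Bool) : Decidable (Spec_matchstar c re text out) := by unfold Spec_matchstar; infer_instance

-- ===== CLAIM (what is proved, stated in full; the proofs are below) =====
def Claim_equal_matchstar : Prop := ∀ (c : String) (re : String) (text : String), Dom_matchstar c re text → Spec_matchstar c re text (matchstar c re text)

-- ===== LEMMAS AND PROOFS =====

-- Simultaneous strong induction on the termination measure: the two matchhere
-- ports agree, and the two matchstar ports agree, on all inputs.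
theorem pv_main : ∀ n : Nat,
    (∀ re text : List Char, 2 * re.length + 2 * text.length = n →
      matchhereA re text = matchhereB re text) ∧
    (∀ c re text : List Char, 2 * re.length + 2 * text.length + 1 = n →
      matchstarA c re text = matchstarB c re text) := by
  intro n
  induction n using Nat.strong_induction_on with
  | _ n ih =>
  refine ⟨?_, ?_⟩
  · -- matchhere
    intro re text hn
    match re with
    | [] => rw [matchhereA, matchhereB]; simp
    | h :: rest =>
      rw [matchhereA, matchhereB]
      match rest with
      | [] =>
        -- no star possible; '$' branch then the character step
        by_cases hd : h = '$'
        · simp [hd]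
        · match text with
          | [] => simp [hd]
          | t :: ts =>
            have hrec : matchhereA [] ts = matchhereB [] ts :=
              (ih (2 * ([] : List Char).length + 2 * ts.length)
                (by simp at hn ⊢; omega)).1 _ _ rfl
            by_cases hc : h = '.' ∨ h = t
            · rcases hc with hc | hc <;> simp [hc, hrec]
            · push Not at hc
              simp [hd, hc.1, hc.2]
      | r :: rs =>
        by_cases hs : r = '*'
        · -- star branch
          have hrec : matchstarA [h] rs text = matchstarB [h] rs text :=
            (ih (2 * rs.length + 2 * text.length + 1)
              (by simp at hn ⊢; omega)).2 _ _ _ rfl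
          simp [hs, hrec]
        · -- not star, not '$' (length ≥ 2), character step
          match text with
          | [] => simp [hs]
          | t :: ts =>
            have hrec : matchhereA (r :: rs) ts = matchhereB (r :: rs) ts :=
              (ih (2 * (r :: rs).length + 2 * ts.length)
                (by simp at hn ⊢; omega)).1 _ _ rfl
            by_cases hc : h = '.' ∨ h = t
            · rcases hc with hc | hc <;> simp [hs, hc, hrec]
            · push Not at hc
              simp [hs, hc.1, hc.2]
  · -- matchstar
    intro c re text hn
    have hh : matchhereA re text = matchhereB re text :=
      (ih (2 * re.length + 2 * text.length) (by omega)).1 _ _ rfl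
    rw [matchstarA, matchstarB.eq_def, hh]
    cases hb : matchhereB re text
    · match text with
      | [] => simp
      | t :: ts =>
        have hrec : matchstarA c re ts = matchstarB c re ts :=
          (ih (2 * re.length + 2 * ts.length + 1)
            (by simp at hn ⊢; omega)).2 _ _ _ rfl
        by_cases hc1 : c = ['.']
        · subst hc1; simp [hrec]
        · by_cases hc2 : ts = c
          · subst hc2; simp [hc1, hrec]
          · simp [hc1, hc2]
    · simp

-- ===== VERDICT (by name: the statement is the Claim_ definition above) =====
theorem matchstar_spec : Claim_equal_matchstar := by
  intro c re text _
  unfold Spec_matchstar matchstar matchstar_alt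
  exact (pv_main (2 * re.toList.length + 2 * text.toList.length + 1)).2 _ _ _ rfl
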